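-- pv_equiv track=rewrite | github.com/sandialabs/snl-quest | snl_libraries/snl_valuation/valuation/es_gui/apps/valuation/definitions/write_json.py | gen_my_tuples
-- ===== SOURCE A (Python) =====
-- def gen_my_tuples(code, year_ending):
--     # generates list of (month, year) tuples based on code and year_ending
--
--     if code == 'Q1':
--         return [(str(m), str(year_ending)) for m in [1, 2, 3]]
--     elif code == 'Q2':
--         return [(str(m), str(year_ending)) for m in [4, 5, 6]]
--     elif code == 'Q3':
--         return [(str(m), str(year_ending)) for m in [7, 8, 9]]
--     elif code == 'Q4':
--         return [(str(m), str(year_ending)) for m in [10, 11, 12]]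
--     elif code == 'H1':
--         return [(str(m), str(year_ending)) for m in range(1, 7)]
--     elif code == 'H2':
--         return [(str(m), str(year_ending)) for m in range(7, 13)]
--     elif code == 'CY':
--         return [(str(m), str(year_ending)) for m in range(1, 13)]
--     elif code == 'FY':
--         return [(str(m), str(year_ending-1)) for m in range(10, 13)]+[(str(m), str(year_ending)) for m in range(1, 10)]
-- ===== SOURCE B (Python) =====
-- # Arithmetic: decode (start, count) from the code's characters, then one generic wrapping
-- # loop; the year of each month is year_ending minus how many year boundaries remain after it.
-- def gen_my_tuples(code, year_ending):
--     if code == 'CY':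
--         start, count = 1, 12
--     elif code == 'FY':
--         start, count = 10, 12
--     elif len(code) == 2 and code[0] in 'QH' and code[1].isdigit():
--         size = 3 if code[0] == 'Q' else 6
--         n = int(code[1])
--         if not 1 <= n <= 12 // size:
--             return None
--         start, count = size * (n - 1) + 1, size
--     else:
--         return None
--     last = start + count - 2          # 0-based raw index of the period's final month
--     out = []
--     for i in range(count):
--         raw = start - 1 + i           # 0-based raw month index, may exceed 11
--         out.append((str(raw % 12 + 1), str(year_ending - (last // 12 - raw // 12))))
--     return out
-- ===== Notes on version B (the rewrite author's own statement) =====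
-- stated objective: alternative
-- what changed: Replaces the eight literally-enumerated branches by arithmetic: (start,count) is decoded from the code's characters (Q/H with a digit, CY, FY), and one generic wrapping loop emits month raw%12+1 with year year_ending minus the remaining year-boundary count (last//12 - raw//12), which yields FY's mixed years without a special case.
-- outside the precondition, e.g. on gen_my_tuples('XX', 2020): A returns None, B returns None
import Mathlib
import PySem

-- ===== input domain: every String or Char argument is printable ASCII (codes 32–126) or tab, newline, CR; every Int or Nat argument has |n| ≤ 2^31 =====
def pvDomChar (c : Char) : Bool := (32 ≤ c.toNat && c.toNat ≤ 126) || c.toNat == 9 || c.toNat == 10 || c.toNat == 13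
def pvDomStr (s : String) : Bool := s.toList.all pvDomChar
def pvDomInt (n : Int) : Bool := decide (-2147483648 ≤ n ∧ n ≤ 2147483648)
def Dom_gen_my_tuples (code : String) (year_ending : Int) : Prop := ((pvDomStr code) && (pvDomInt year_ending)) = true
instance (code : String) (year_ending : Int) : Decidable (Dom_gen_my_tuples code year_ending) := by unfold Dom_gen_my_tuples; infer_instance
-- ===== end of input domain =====

-- B decodes (start,count) arithmetically from the code's characters and emits months with one
-- generic wrapping loop (year offset from last//12 - raw//12) instead of A's eight enumerated
-- branches — alternative algorithm, same cost. Pre_ excludes unrecognised codes, where both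
-- Pythons return None (not a list).


-- ===== PORT A =====
-- Literal transliteration of A's if/elif chain; the missing final else (Python returns
-- None there) is outside Pre_ and ports to [].
def gen_my_tuples (code : String) (year_ending : Int) : List (String × String) :=
  if code = "Q1" then
    ([1, 2, 3] : List Int).map (fun m => (PySem.Int.toStr m, PySem.Int.toStr year_ending))
  else if code = "Q2" then
    ([4, 5, 6] : List Int).map (fun m => (PySem.Int.toStr m, PySem.Int.toStr year_ending))
  else if code = "Q3" then
    ([7, 8, 9] : List Int).map (fun m => (PySem.Int.toStr m, PySem.Int.toStr year_ending))
  else if code = "Q4" then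
    ([10, 11, 12] : List Int).map (fun m => (PySem.Int.toStr m, PySem.Int.toStr year_ending))
  else if code = "H1" then
    (PySem.List.pyRange 1 7 1).map (fun m => (PySem.Int.toStr m, PySem.Int.toStr year_ending))
  else if code = "H2" then
    (PySem.List.pyRange 7 13 1).map (fun m => (PySem.Int.toStr m, PySem.Int.toStr year_ending))
  else if code = "CY" then
    (PySem.List.pyRange 1 13 1).map (fun m => (PySem.Int.toStr m, PySem.Int.toStr year_ending))
  else if code = "FY" then
    (PySem.List.pyRange 10 13 1).map (fun m => (PySem.Int.toStr m, PySem.Int.toStr (year_ending - 1)))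
      ++ (PySem.List.pyRange 1 10 1).map (fun m => (PySem.Int.toStr m, PySem.Int.toStr year_ending))
  else []  -- Python: implicit None; excluded by Pre_

-- ===== PORT B =====
-- helper for Source B's body once (start, count) is decoded: the generic wrapping month loop
-- (for i in range(count): out.append(...)), transliterated as a foldl over the same range.
def pvEmit (start count year_ending : Int) : List (String × String) :=
  let last := start + count - 2
  (PySem.List.pyRange 0 count 1).foldl
    (fun out i =>
      let raw := start - 1 + i
      out ++ [(PySem.Int.toStr (PySem.Int.mod raw 12 + 1),
               PySem.Int.toStr (year_ending - (PySem.Int.floordiv last 12 - PySem.Int.floordiv raw 12)))])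
    []

-- transliteration of Source B: decode (start, count) from the code's characters; the 'return None'
-- paths (unrecognised code) are outside Pre_ and port to [].
def gen_my_tuples_alt (code : String) (year_ending : Int) : List (String × String) :=
  if code = "CY" then pvEmit 1 12 year_ending
  else if code = "FY" then pvEmit 10 12 year_ending
  else
    -- len(code) == 2 and code[0] in 'QH' and code[1].isdigit(): hand-ported, exact on the
    -- ASCII domain (Python str.isdigit = Char.isDigit there; int(d) of a digit = d - '0')
    match code.toList with
    | [k, d] =>
      if (k = 'Q' ∨ k = 'H') ∧ d.isDigit then
        let size : Int := if k = 'Q' then 3 else 6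
        let n : Int := (d.toNat : Int) - 48
        if 1 ≤ n ∧ n ≤ PySem.Int.floordiv 12 size then
          pvEmit (size * (n - 1) + 1) size year_ending
        else []  -- Python: return None; excluded by Pre_
      else []    -- Python: return None; excluded by Pre_
    | _ => []    -- Python: return None; excluded by Pre_

-- ===== PRECONDITION & SPEC =====
-- Pre_ excludes unrecognised codes: there A falls off the if/elif chain and returns None,
-- which is not a value of the declared list type (B likewise returns None).
def Pre_gen_my_tuples (code : String) (year_ending : Int) : Prop :=
  code = "Q1" ∨ code = "Q2" ∨ code = "Q3" ∨ code = "Q4" ∨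
  code = "H1" ∨ code = "H2" ∨ code = "CY" ∨ code = "FY"
instance (code : String) (year_ending : Int) : Decidable (Pre_gen_my_tuples code year_ending) := by unfold Pre_gen_my_tuples; infer_instance

def pvWitness_gen_my_tuples : String × Int := ("FY", 2020)

def Spec_gen_my_tuples (code : String) (year_ending : Int) (out : List (String × String)) : Prop := out = gen_my_tuples_alt code year_ending
instance (code : String) (year_ending : Int) (out : List (String × String)) : Decidable (Spec_gen_my_tuples code year_ending out) := by unfold Spec_gen_my_tuples; infer_instance

-- ===== CLAIM (what is proved, stated in full; the proofs are below) =====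
def Claim_equal_gen_my_tuples : Prop := ∀ (code : String) (year_ending : Int), Dom_gen_my_tuples code year_ending → Pre_gen_my_tuples code year_ending → Spec_gen_my_tuples code year_ending (gen_my_tuples code year_ending)

-- ===== LEMMAS AND PROOFS =====

-- ===== VERDICT (by name: the statement is the Claim_ definition above) =====
theorem gen_my_tuples_spec : Claim_equal_gen_my_tuples := by
  intro code year_ending _ hpre
  unfold Spec_gen_my_tuples
  rcases hpre with h | h | h | h | h | h | h | h <;> subst h <;>
    simp [gen_my_tuples, gen_my_tuples_alt, pvEmit, PySem.List.pyRange,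
      PySem.Int.mod, PySem.Int.floordiv, List.range_succ, sub_eq_add_neg]
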